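-- pv_equiv track=rewrite | github.com/mrsata/JP-EN-discrepancy-calculator | jtranscript.py | index_w
-- ===== SOURCE A (Python) =====
-- def index_w(w):
--     wi = ""
--     n = 1
--     for i in range(len(w)):
--         wi += w[i]
--         if w[i] == 'c' or w[i] == '-' or w[i] == ' ': continue
--         elif w[i] == 't':
--             if i < len(w) - 1 and w[i + 1] == 's':
--                 continue
--         wi += str(n)
--         n += 1
--     return wi
-- ===== SOURCE B (Python) =====
-- def index_w(w):
--     # Collect the positions that receive a number, then assemble the output
--     # from slices of w between consecutive numbered positions: each numbered
--     # position pos contributes the untouched segment w[prev:pos+1] followed by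
--     # its number; the leftover tail w[prev:] is appended at the end.
--     kept = [i for i in range(len(w))
--             if not (w[i] in 'c- ' or (w[i] == 't' and w[i + 1:i + 2] == 's'))]
--     pieces = []
--     prev = 0
--     for num, pos in enumerate(kept, 1):
--         pieces.append(w[prev:pos + 1])
--         pieces.append(str(num))
--         prev = pos + 1
--     pieces.append(w[prev:])
--     return ''.join(pieces)
-- ===== Notes on version B (the rewrite author's own statement) =====
-- stated objective: alternative
-- what changed: Instead of A's char-by-char pass with inline skip branches and a running counter, B first computes the list of numbered positions, then assembles the result from whole slices of w between consecutive numbered positions, inserting each position's 1-based rank from enumerate; no per-character state survives between the passes.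
import Mathlib
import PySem

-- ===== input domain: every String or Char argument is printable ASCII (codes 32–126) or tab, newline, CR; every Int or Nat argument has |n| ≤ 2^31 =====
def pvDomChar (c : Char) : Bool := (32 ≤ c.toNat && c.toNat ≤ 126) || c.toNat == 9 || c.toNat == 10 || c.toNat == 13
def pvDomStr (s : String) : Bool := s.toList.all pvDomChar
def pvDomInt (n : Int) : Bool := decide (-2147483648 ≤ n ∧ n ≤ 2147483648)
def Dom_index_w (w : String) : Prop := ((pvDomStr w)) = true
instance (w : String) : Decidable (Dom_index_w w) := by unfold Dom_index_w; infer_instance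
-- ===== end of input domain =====

-- B replaces A's char-by-char pass (inline skip branches, running counter) by a
-- positions-then-slices assembly: first the list of numbered positions, then slices of w
-- between consecutive numbered positions with each position's enumerate rank; objective: alternative.

-- ===== PORT A =====
-- single pass over indices, accumulating the output characters and the counter
def indexWgo (cs : List Char) (i : Nat) (wi : List Char) (n : Int) : List Char :=
  if h : i < cs.length then
    let wi' := wi ++ [cs[i]]
    if cs[i] = 'c' ∨ cs[i] = '-' ∨ cs[i] = ' ' then
      indexWgo cs (i + 1) wi' n
    else if cs[i] = 't' ∧ (i : Int) < (cs.length : Int) - 1 ∧ cs[i + 1]! = 's' then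
      indexWgo cs (i + 1) wi' n
    else
      indexWgo cs (i + 1) (wi' ++ PySem.Int.toChars n) (n + 1)
  else wi
termination_by cs.length - i

def index_w (w : String) : String := String.ofList (indexWgo w.toList 0 [] 1)

-- ===== PORT B =====
-- Source B's skip test for position i: w[i] in 'c- ' or (w[i] == 't' and w[i+1:i+2] == 's')
def pvSkipAt (cs : List Char) (i : Nat) : Bool :=
  ['c', '-', ' '].contains cs[i]! ||
    (cs[i]! == 't' &&
      PySem.List.slice cs (some ((i : Int) + 1)) (some ((i : Int) + 2)) == ['s'])

-- Source B's loop body over enumerate(kept, 1): state (pieces, prev, num)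
def pvSegStep (w : String) (st : List String × Nat × Int) (pos : Nat) :
    List String × Nat × Int :=
  (st.1 ++ [PySem.Str.slice w (some (st.2.1 : Int)) (some ((pos : Int) + 1)),
            PySem.Int.toStr st.2.2],
   pos + 1, st.2.2 + 1)

def index_w_alt (w : String) : String :=
  let kept := (List.range w.toList.length).filter (fun i => !pvSkipAt w.toList i)
  let st := kept.foldl (pvSegStep w) ([], 0, 1)
  PySem.Str.join "" (st.1 ++ [PySem.Str.slice w (some (st.2.1 : Int)) none])

-- ===== PRECONDITION & SPEC =====
def Spec_index_w (w : String) (out : String) : Prop := out = index_w_alt w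
instance (w : String) (out : String) : Decidable (Spec_index_w w out) := by unfold Spec_index_w; infer_instance

-- ===== CLAIM (what is proved, stated in full; the proofs are below) =====
def Claim_equal_index_w : Prop := ∀ (w : String), Dom_index_w w → Spec_index_w w (index_w w)

-- ===== LEMMAS AND PROOFS =====

-- canonical description of the output characters, indexed by position
def pvCanonIdx (cs : List Char) (k : Nat) (n : Int) : List Char :=
  if h : k < cs.length then
    if pvSkipAt cs k then cs[k] :: pvCanonIdx cs (k + 1) n
    else cs[k] :: (PySem.Int.toChars n ++ pvCanonIdx cs (k + 1) (n + 1))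
  else []
termination_by cs.length - k

-- canonical description of B's pieces list
def pvPieces (w : String) (k prev : Nat) (n : Int) : List String :=
  if k < w.toList.length then
    if pvSkipAt w.toList k then pvPieces w (k + 1) prev n
    else PySem.Str.slice w (some (prev : Int)) (some ((k : Int) + 1)) ::
         PySem.Int.toStr n :: pvPieces w (k + 1) (k + 1) (n + 1)
  else [PySem.Str.slice w (some (prev : Int)) none]
termination_by w.toList.length - k
decreasing_by all_goals omega

theorem pvSkipAt_true (cs : List Char) (i : Nat) (h : i < cs.length) :
    pvSkipAt cs i = true ↔
      (cs[i] = 'c' ∨ cs[i] = '-' ∨ cs[i] = ' ') ∨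
      (cs[i] = 't' ∧ (i : Int) < (cs.length : Int) - 1 ∧ cs[i + 1]! = 's') := by
  have e1 : (i : Int) + 1 = ((i + 1 : Nat) : Int) := by push_cast; ring
  have e2 : (i : Int) + 2 = ((i + 2 : Nat) : Int) := by push_cast; ring
  unfold pvSkipAt
  rw [e1, e2, PySem.List.slice_natCast]
  have e3 : i + 2 - (i + 1) = 1 := by omega
  rw [e3]
  rw [List.getElem!_eq_getElem?_getD, List.getElem?_eq_getElem h, Option.getD_some]
  by_cases h2 : i + 1 < cs.length
  · have hd : cs.drop (i + 1) = cs[i + 1] :: cs.drop (i + 2) := by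
      rw [List.drop_eq_getElem_cons h2]
    have h4 : List.take 1 (cs.drop (i + 1)) = [cs[i + 1]] := by rw [hd]; rfl
    rw [h4]
    have hl : (i : Int) < (cs.length : Int) - 1 := by push_cast; omega
    rw [List.getElem!_eq_getElem?_getD, List.getElem?_eq_getElem h2, Option.getD_some]
    by_cases hc : cs[i] = 'c' <;> by_cases hd2 : cs[i] = '-' <;> by_cases hs : cs[i] = ' ' <;>
      by_cases ht : cs[i] = 't' <;> by_cases hn : cs[i + 1] = 's' <;>
        simp [hc, hd2, hs, ht, hn, hl]
  · have hd : cs.drop (i + 1) = [] := List.drop_eq_nil_of_le (by omega)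
    rw [hd]
    have hl : ¬ ((i : Int) < (cs.length : Int) - 1) := by push_cast; omega
    by_cases hc : cs[i] = 'c' <;> by_cases hd2 : cs[i] = '-' <;> by_cases hs : cs[i] = ' ' <;>
      simp [hc, hd2, hs, hl]

theorem lemA (cs : List Char) (i : Nat) (wi : List Char) (n : Int) :
    indexWgo cs i wi n = wi ++ pvCanonIdx cs i n := by
  induction i, wi, n using indexWgo.induct cs with
  | case1 i wi n h wi' hc ih =>
    have hskip : pvSkipAt cs i = true := (pvSkipAt_true cs i h).mpr (Or.inl hc)
    rw [indexWgo, dif_pos h]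
    simp only [if_pos hc]
    rw [ih]
    conv_rhs => rw [pvCanonIdx]
    rw [dif_pos h, if_pos hskip]
    simp [wi']
  | case2 i wi n h wi' hc ht ih =>
    have hskip : pvSkipAt cs i = true := (pvSkipAt_true cs i h).mpr (Or.inr ht)
    rw [indexWgo, dif_pos h]
    simp only [if_neg hc, if_pos ht]
    rw [ih]
    conv_rhs => rw [pvCanonIdx]
    rw [dif_pos h, if_pos hskip]
    simp [wi']
  | case3 i wi n h wi' hc ht ih =>
    have hskip : pvSkipAt cs i = false := by
      rw [← Bool.not_eq_true, pvSkipAt_true cs i h]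
      tauto
    rw [indexWgo, dif_pos h]
    simp only [if_neg hc, if_neg ht]
    rw [ih]
    conv_rhs => rw [pvCanonIdx]
    rw [dif_pos h, if_neg (by simp [hskip])]
    simp [wi']
  | case4 i wi n h =>
    rw [indexWgo, dif_neg h, pvCanonIdx, dif_neg h]
    simp

-- B's fold over the kept positions produces exactly the canonical pieces list
theorem pieces_foldl (w : String) (m : Nat) :
    ∀ (k prev : Nat) (parts : List String) (n : Int), m = w.toList.length - k →
    (((List.range' k m).filter (fun i => !pvSkipAt w.toList i)).foldl
        (pvSegStep w) (parts, prev, n)).1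
      ++ [PySem.Str.slice w
          (some (((((List.range' k m).filter (fun i => !pvSkipAt w.toList i)).foldl
            (pvSegStep w) (parts, prev, n)).2.1 : Nat) : Int)) none]
      = parts ++ pvPieces w k prev n := by
  induction m with
  | zero =>
    intro k prev parts n hm
    have hk : ¬ k < w.toList.length := by omega
    simp only [List.range'_zero, List.filter_nil, List.foldl_nil]
    rw [pvPieces, if_neg hk]
  | succ m ih =>
    intro k prev parts n hm
    have hk : k < w.toList.length := by omega
    rw [pvPieces, if_pos hk]
    by_cases hs : pvSkipAt w.toList k = true
    · rw [if_pos hs]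
      simp only [List.range'_succ, List.filter_cons, hs, Bool.not_true,
        Bool.false_eq_true, if_false]
      exact ih (k + 1) prev parts n (by omega)
    · have hs' : pvSkipAt w.toList k = false := by simpa using hs
      rw [if_neg (by simp [hs'])]
      simp only [List.range'_succ, List.filter_cons, hs', Bool.not_false, if_true,
        List.foldl_cons]
      have hstep : pvSegStep w (parts, prev, n) k
          = (parts ++ [PySem.Str.slice w (some (prev : Int)) (some ((k : Int) + 1)),
              PySem.Int.toStr n], k + 1, n + 1) := rfl
      rw [hstep, ih (k + 1) (k + 1) _ (n + 1) (by omega)]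
      simp

theorem join_nil_cons (p : List Char) (rest : List (List Char)) :
    PySem.Chars.join [] (p :: rest) = p ++ PySem.Chars.join [] rest := by
  cases rest with
  | nil => simp [PySem.Chars.join_singleton, PySem.Chars.join_nil]
  | cons q r => simp [PySem.Chars.join_cons_cons]

theorem take_succ_drop (cs : List Char) (prev k : Nat) (hpk : prev ≤ k)
    (hk : k < cs.length) :
    (cs.drop prev).take (k + 1 - prev) = (cs.drop prev).take (k - prev) ++ [cs[k]] := by
  have e : k + 1 - prev = (k - prev) + 1 := by omega
  rw [e, List.take_add_one]
  have hg : (cs.drop prev)[k - prev]? = some cs[k] := by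
    rw [List.getElem?_drop]
    have e2 : prev + (k - prev) = k := by omega
    rw [e2, List.getElem?_eq_getElem hk]
  rw [hg]
  rfl

theorem join_pvPieces (w : String) (m : Nat) :
    ∀ (k prev : Nat) (n : Int), m = w.toList.length - k → prev ≤ k →
    PySem.Chars.join [] ((pvPieces w k prev n).map String.toList)
      = (w.toList.drop prev).take (k - prev) ++ pvCanonIdx w.toList k n := by
  induction m with
  | zero =>
    intro k prev n hm hpk
    have hk : ¬ k < w.toList.length := by omega
    rw [pvPieces, if_neg hk]
    conv_rhs => rw [pvCanonIdx]
    rw [dif_neg hk]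
    simp only [List.map_cons, List.map_nil, PySem.Chars.join_singleton, List.append_nil]
    rw [PySem.Str.toList_slice, PySem.Chars.slice_eq_listSlice, PySem.List.slice_from_natCast]
    rw [List.take_of_length_le (by simp only [List.length_drop]; omega)]
  | succ m ih =>
    intro k prev n hm hpk
    have hk : k < w.toList.length := by omega
    by_cases hs : pvSkipAt w.toList k = true
    · rw [pvPieces, if_pos hk, if_pos hs]
      conv_rhs => rw [pvCanonIdx]
      rw [dif_pos hk, if_pos hs]
      rw [ih (k + 1) prev n (by omega) (by omega)]
      rw [take_succ_drop w.toList prev k hpk hk]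
      simp
    · have hs' : pvSkipAt w.toList k = false := by simpa using hs
      rw [pvPieces, if_pos hk, if_neg (by simp [hs'])]
      conv_rhs => rw [pvCanonIdx]
      rw [dif_pos hk, if_neg (by simp [hs'])]
      simp only [List.map_cons]
      rw [join_nil_cons, join_nil_cons]
      rw [ih (k + 1) (k + 1) (n + 1) (by omega) (by omega)]
      have e1 : (k : Int) + 1 = ((k + 1 : Nat) : Int) := by push_cast; ring
      rw [PySem.Str.toList_slice, PySem.Chars.slice_eq_listSlice, e1, PySem.List.slice_natCast]
      rw [take_succ_drop w.toList prev k hpk hk]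
      have e2 : k + 1 - (k + 1) = 0 := by omega
      rw [e2]
      simp [PySem.Int.toList_toStr]

theorem alt_eq (w : String) : (index_w_alt w).toList = pvCanonIdx w.toList 0 1 := by
  have hf := pieces_foldl w w.toList.length 0 0 [] 1 (by omega)
  simp only [List.nil_append] at hf
  have h1 : index_w_alt w = PySem.Str.join "" (pvPieces w 0 0 1) := by
    simp only [index_w_alt, List.range_eq_range']
    rw [hf]
  rw [h1, PySem.Str.toList_join]
  have e : ("" : String).toList = [] := rfl
  rw [e]
  have hj := join_pvPieces w w.toList.length 0 0 1 (by omega) (le_refl 0)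
  simpa using hj

-- ===== VERDICT (by name: the statement is the Claim_ definition above) =====
theorem index_w_spec : Claim_equal_index_w := by
  intro w _
  unfold Spec_index_w index_w
  rw [lemA w.toList 0 [] 1]
  calc String.ofList ([] ++ pvCanonIdx w.toList 0 1)
      = String.ofList (index_w_alt w).toList := by rw [alt_eq]; simp
    _ = index_w_alt w := String.ofList_toList
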